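-- pv_equiv track=rewrite | github.com/cristinaimprota/Investigating-Training-Data-s-Role | 1_dataset_preprocessing_and_filtering/3_further_cleaning.py | clean_purpose
-- ===== SOURCE A (Python) =====
-- def clean_purpose(doc):
--     cleaned_doc_lines = []
--     doc_lines = doc.split('\n')
--     for line in doc_lines:
--         if line.lower() == '<purpose>':
--             continue
--         if line.lower() == '<arguments>' or  line.lower() == '<exceptions>' or\
--             line.lower() == '<side fffects>' or line.lower() == '<returns>':
--             break
--         cleaned_doc_lines.append(line)
--     return '\n'.join(cleaned_doc_lines)
-- ===== SOURCE B (Python) =====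
-- BREAK_TAGS = ('<arguments>', '<exceptions>', '<side fffects>', '<returns>')
--
-- def clean_purpose(doc):
--     # Traverse the lines back-to-front, resetting the accumulator at every break
--     # tag: after the whole pass the accumulator holds (reversed) exactly the
--     # lines that precede the FIRST break tag, minus the '<purpose>' lines.
--     kept = []
--     for line in reversed(doc.split('\n')):
--         low = line.lower()
--         if low in BREAK_TAGS:
--             kept.clear()
--         elif low != '<purpose>':
--             kept.append(line)
--     return '\n'.join(reversed(kept))
-- ===== Notes on version B (the rewrite author's own statement) =====
-- stated objective: alternative
-- what changed: Replaces A's forward loop with early break by a reverse traversal that resets the accumulator at every break tag (the lines surviving all resets are exactly those before the first break tag), then reverses the kept lines back.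
import Mathlib
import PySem

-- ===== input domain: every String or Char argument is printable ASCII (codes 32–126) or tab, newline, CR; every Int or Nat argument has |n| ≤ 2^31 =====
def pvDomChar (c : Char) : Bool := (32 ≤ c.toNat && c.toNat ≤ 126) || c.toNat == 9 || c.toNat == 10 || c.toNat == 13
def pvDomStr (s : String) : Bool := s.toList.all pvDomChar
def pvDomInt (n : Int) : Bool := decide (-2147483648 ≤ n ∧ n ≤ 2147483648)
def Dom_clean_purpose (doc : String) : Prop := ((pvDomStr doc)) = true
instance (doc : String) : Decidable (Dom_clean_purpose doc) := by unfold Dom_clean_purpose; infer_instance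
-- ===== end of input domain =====

-- B replaces A's forward loop with break by a reverse traversal that RESETS the
-- accumulator at every break tag (alternative decomposition; same O(n) cost).

-- ===== PORT A =====
-- the for-loop over doc_lines with continue/break/append, accumulator = cleaned_doc_lines
-- doc.split("\n") is ported as (PySem.Str.split? doc "\n").getD [] (sep ≠ "" so split? = some, exact)
def cleanLoopA (acc : List String) : List String → List String
  | [] => acc
  | line :: rest =>
    if PySem.Str.lower line = "<purpose>" then cleanLoopA acc rest
    else if PySem.Str.lower line = "<arguments>" ∨ PySem.Str.lower line = "<exceptions>" ∨
            PySem.Str.lower line = "<side fffects>" ∨ PySem.Str.lower line = "<returns>" then acc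
    else cleanLoopA (acc ++ [line]) rest

def clean_purpose (doc : String) : String :=
  PySem.Str.join "\n" (cleanLoopA [] ((PySem.Str.split? doc "\n").getD []))

-- ===== PORT B =====
-- membership in the literal tuple BREAK_TAGS, ported as membership in the literal list (exact)
def isBreakTag (l : String) : Bool :=
  PySem.Str.lower l ∈ ["<arguments>", "<exceptions>", "<side fffects>", "<returns>"]

-- the for-loop over reversed(lines): reset (kept.clear) on a break tag, else append
def revLoopB (kept : List String) : List String → List String
  | [] => kept
  | line :: rest =>
    if isBreakTag line then revLoopB [] rest
    else if PySem.Str.lower line = "<purpose>" then revLoopB kept rest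
    else revLoopB (kept ++ [line]) rest

def clean_purpose_alt (doc : String) : String :=
  let lines := (PySem.Str.split? doc "\n").getD []
  PySem.Str.join "\n" ((revLoopB [] lines.reverse).reverse)

-- ===== PRECONDITION & SPEC =====
def Spec_clean_purpose (doc : String) (out : String) : Prop := out = clean_purpose_alt doc
instance (doc : String) (out : String) : Decidable (Spec_clean_purpose doc out) := by unfold Spec_clean_purpose; infer_instance

-- ===== CLAIM (what is proved, stated in full; the proofs are below) =====
def Claim_equal_clean_purpose : Prop := ∀ (doc : String), Dom_clean_purpose doc → Spec_clean_purpose doc (clean_purpose doc)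

-- ===== LEMMAS AND PROOFS =====
def notPurpose (l : String) : Bool := PySem.Str.lower l ≠ "<purpose>"

-- A's loop returns the non-purpose lines of the break-free prefix
theorem cleanLoopA_eq (lines : List String) : ∀ acc,
    cleanLoopA acc lines =
      acc ++ (lines.takeWhile (fun l => !isBreakTag l)).filter notPurpose := by
  induction lines with
  | nil => intro acc; simp [cleanLoopA]
  | cons l rest ih =>
    intro acc
    by_cases hp : PySem.Str.lower l = "<purpose>"
    · have hb : isBreakTag l = false := by simp [isBreakTag, hp]
      simp [cleanLoopA, hp, hb, ih, notPurpose]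
    · by_cases hbr : PySem.Str.lower l = "<arguments>" ∨ PySem.Str.lower l = "<exceptions>" ∨
          PySem.Str.lower l = "<side fffects>" ∨ PySem.Str.lower l = "<returns>"
      · have hb : isBreakTag l = true := by simp [isBreakTag]; tauto
        simp [cleanLoopA, hp, hbr, hb]
      · have hb : isBreakTag l = false := by simp [isBreakTag]; tauto
        simp [cleanLoopA, hp, hbr, hb, ih, notPurpose]

theorem revLoopB_append (xs ys : List String) : ∀ acc,
    revLoopB acc (xs ++ ys) = revLoopB (revLoopB acc xs) ys := by
  induction xs with
  | nil => intro acc; simp [revLoopB]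
  | cons x xs ih =>
    intro acc
    by_cases hb : isBreakTag x
    · simp [revLoopB, hb, ih]
    · by_cases hp : PySem.Str.lower x = "<purpose>" <;> simp [revLoopB, hb, hp, ih]

-- on a break-free list, B's loop just filters out purpose lines
theorem revLoopB_noBreak (xs : List String) : ∀ acc, (∀ l ∈ xs, isBreakTag l = false) →
    revLoopB acc xs = acc ++ xs.filter notPurpose := by
  induction xs with
  | nil => intro acc _; simp [revLoopB]
  | cons x xs ih =>
    intro acc h
    have hb : isBreakTag x = false := h x (by simp)
    have hxs : ∀ l ∈ xs, isBreakTag l = false := fun l hl => h l (by simp [hl])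
    by_cases hp : PySem.Str.lower x = "<purpose>"
    · simp [revLoopB, hb, ih _ hxs, List.filter, notPurpose, hp]
    · simp [revLoopB, hb, hp, ih _ hxs, List.filter, notPurpose]

theorem dropWhile_head_false (p : String → Bool) : ∀ (l : List String) (b : String)
    (suf : List String), l.dropWhile p = b :: suf → p b = false := by
  intro l
  induction l with
  | nil => intro b suf h; simp [List.dropWhile] at h
  | cons x xs ih =>
    intro b suf h
    by_cases hx : p x
    · exact ih b suf (by simpa [List.dropWhile, hx] using h)
    · rw [List.dropWhile_cons_of_neg (by simpa using hx)] at h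
      cases h; simpa using hx

theorem revLoopB_reverse_eq (lines : List String) :
    (revLoopB [] lines.reverse).reverse =
      (lines.takeWhile (fun l => !isBreakTag l)).filter notPurpose := by
  have hsplit := List.takeWhile_append_dropWhile (p := fun l => !isBreakTag l) (l := lines)
  set pre := lines.takeWhile (fun l => !isBreakTag l) with hpre
  have hpreF : ∀ l ∈ pre, isBreakTag l = false := by
    intro l hl
    have := List.mem_takeWhile_imp hl
    simpa using this
  cases hdrop : lines.dropWhile (fun l => !isBreakTag l) with
  | nil =>
    have hlines : lines = pre := by rw [← hsplit, hdrop, List.append_nil]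
    have : ∀ l ∈ lines.reverse, isBreakTag l = false := by
      intro l hl; exact hpreF l (by rw [hlines] at hl; simpa using hl)
    rw [revLoopB_noBreak _ _ this, List.nil_append, ← List.filter_reverse,
      List.reverse_reverse, hlines]
  | cons b suf =>
    have hbB : isBreakTag b = true := by
      have := dropWhile_head_false (fun l => !isBreakTag l) lines b suf hdrop
      simpa using this
    have hlines : lines = pre ++ b :: suf := by rw [← hsplit, hdrop]
    have : lines.reverse = (suf.reverse ++ [b]) ++ pre.reverse := by
      rw [hlines]; simp
    rw [this, revLoopB_append, revLoopB_append]
    have hreset : revLoopB (revLoopB [] suf.reverse) [b] = [] := by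
      simp [revLoopB, hbB]
    rw [hreset, revLoopB_noBreak _ _ (fun l hl => hpreF l (by simpa using hl)),
      List.nil_append, ← List.filter_reverse, List.reverse_reverse]

-- ===== VERDICT (by name: the statement is the Claim_ definition above) =====
theorem clean_purpose_spec : Claim_equal_clean_purpose := by
  intro doc _
  unfold Spec_clean_purpose clean_purpose clean_purpose_alt
  simp only [cleanLoopA_eq, revLoopB_reverse_eq, List.nil_append]
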